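-- pv_equiv track=rewrite | github.com/liushuyu6666/ALGORITHM_Languages.Mars | Code/Python/src/LowestSales.py | nth_lowest_selling
-- ===== SOURCE A (Python) =====
-- def nth_lowest_selling(sales, n):
--     count = dict()
--     for book in sales:
--         if book in count.keys():
--             count[book] += 1
--         else:
--             count[book] = 1
--     # find the n-th lowest
--     count = dict(sorted(count.items(), key=lambda item: item[1]))
--     keys = list(count.keys())
--     if n <= 0 or n > len(count):
--         return None
--     return keys[n - 1]
-- ===== SOURCE B (Python) =====
-- def nth_lowest_selling(sales, n):
--     count = {}
--     for book in sales:
--         count[book] = count.get(book, 0) + 1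
--     if n <= 0 or n > len(count):
--         return None
--     buckets = {}
--     for book, c in count.items():
--         buckets.setdefault(c, []).append(book)
--     ordered = []
--     for c in range(1, max(buckets) + 1):
--         ordered.extend(buckets.get(c, []))
--     return ordered[n - 1]
-- ===== Notes on version B (the rewrite author's own statement) =====
-- stated objective: faster
-- what changed: Replaces A's stable sort of the (book, count) items plus dict-rebuild by frequency buckets filled in first-appearance order and concatenated for count = 1 .. max, which yields the same stable ordering without sorting.
import Mathlib
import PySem

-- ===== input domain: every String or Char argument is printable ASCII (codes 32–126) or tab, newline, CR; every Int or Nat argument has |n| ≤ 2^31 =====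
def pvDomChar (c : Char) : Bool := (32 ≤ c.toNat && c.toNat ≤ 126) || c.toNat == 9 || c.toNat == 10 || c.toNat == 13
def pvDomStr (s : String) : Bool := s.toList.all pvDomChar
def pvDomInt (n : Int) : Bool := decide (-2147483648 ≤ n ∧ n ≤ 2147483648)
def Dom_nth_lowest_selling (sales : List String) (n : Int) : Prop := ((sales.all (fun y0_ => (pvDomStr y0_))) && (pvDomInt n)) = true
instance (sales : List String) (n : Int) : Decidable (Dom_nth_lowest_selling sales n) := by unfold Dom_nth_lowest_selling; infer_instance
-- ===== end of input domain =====

-- B replaces A's stable sort of the count items by frequency buckets concatenated in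
-- increasing count order (same result; avoids the comparison sort — measured faster in a timing run).

-- ===== PORT A =====
def nth_lowest_selling (sales : List String) (n : Int) : Option String :=
  let count := sales.foldl (fun d book =>
      if d.contains book then d.insert book (d.getD book 0 + 1)
      else d.insert book 1) (PySem.Dict.empty : PySem.Dict String Int)
  let count2 := PySem.Dict.ofList (PySem.List.sorted count.items (fun item => item.2) false)
  let keys := count2.keys
  if n ≤ 0 ∨ (count2.size : Int) < n then none
  else PySem.List.pyGet? keys (n - 1)

-- ===== PORT B =====
def nth_lowest_selling_alt (sales : List String) (n : Int) : Option String :=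
  let count := sales.foldl (fun d book => d.insert book (d.getD book 0 + 1)) PySem.Dict.empty
  if n ≤ 0 ∨ (count.size : Int) < n then none
  else
    let buckets := (count.items.map (fun p => (p.2, p.1))).foldl
        (fun d p => d.modify p.1 [] (fun v => v ++ [p.2])) PySem.Dict.empty
    match PySem.List.max? buckets.keys (fun c => c) with
    | none => none
    | some m =>
      let ordered := (PySem.List.pyRange 1 (m + 1)).foldl (fun acc c => acc ++ buckets.getD c []) []
      PySem.List.pyGet? ordered (n - 1)

-- ===== PRECONDITION & SPEC =====
def Spec_nth_lowest_selling (sales : List String) (n : Int) (out : Option String) : Prop := out = nth_lowest_selling_alt sales n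
instance (sales : List String) (n : Int) (out : Option String) : Decidable (Spec_nth_lowest_selling sales n out) := by unfold Spec_nth_lowest_selling; infer_instance

-- ===== CLAIM (what is proved, stated in full; the proofs are below) =====
def Claim_equal_nth_lowest_selling : Prop := ∀ (sales : List String) (n : Int), Dom_nth_lowest_selling sales n → Spec_nth_lowest_selling sales n (nth_lowest_selling sales n)

-- ===== LEMMAS AND PROOFS =====

theorem pv_foldl_some_isSome {α β : Type} (f : Option α → β → Option α)
    (hf : ∀ m x, (f (some m) x).isSome) (t : List β) (m : α) : (t.foldl f (some m)).isSome := by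
  induction t generalizing m with
  | nil => simp
  | cons a t ih =>
    simp only [List.foldl_cons]
    rcases Option.isSome_iff_exists.mp (hf m a) with ⟨m', hm'⟩
    rw [hm']; exact ih m'

theorem pv_max?_isSome_of_ne_nil (xs : List Int) (hx : xs ≠ []) :
    ∃ m, PySem.List.max? xs (fun c => c) = some m := by
  cases xs with
  | nil => simp at hx
  | cons a t =>
    apply Option.isSome_iff_exists.mp
    simp only [PySem.List.max?, List.foldl_cons]
    apply pv_foldl_some_isSome
    intro m x
    by_cases h : m < x <;> simp [h]

theorem pv_insertBy_append_left {α : Type} (before : α → α → Bool) (x : α) (P S : List α)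
    (h : ∀ y ∈ P, before x y = false) :
    PySem.List.insertBy before x (P ++ S) = P ++ PySem.List.insertBy before x S := by
  induction P with
  | nil => simp
  | cons y ys ih => simp_all [PySem.List.insertBy]

-- stable bucket sort equals Python's stable sort by count
theorem pv_bucketize (l : List (String × Int)) (M : Int)
    (h : ∀ p ∈ l, 1 ≤ p.2 ∧ p.2 ≤ M) :
    (PySem.List.pyRange 1 (M + 1)).flatMap (fun c => l.filter (fun p => p.2 == c))
      = PySem.List.sorted l (fun p => p.2) false := by
  induction l using List.reverseRecOn with
  | nil => simp [(PySem.List.sorted_eq_nil_iff ([] : List (String × Int)) (fun p => p.2) false).mpr rfl]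
  | append_singleton l x ih =>
    obtain ⟨hx1, hxM⟩ := h x (by simp)
    have hl : ∀ p ∈ l, 1 ≤ p.2 ∧ p.2 ≤ M := fun p hp => h p (by simp [hp])
    rw [PySem.List.sorted_eq_foldl_insertBy, List.foldl_append, List.foldl_cons, List.foldl_nil,
      ← PySem.List.sorted_eq_foldl_insertBy, ← ih hl]
    have hsplit : PySem.List.pyRange 1 (M + 1)
        = PySem.List.pyRange 1 (x.2 + 1) ++ PySem.List.pyRange (x.2 + 1) (M + 1) :=
      PySem.List.pyRange_one_append 1 (x.2 + 1) (M + 1) (by omega) (by omega)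
    have h1 : PySem.List.pyRange 1 (x.2 + 1) = PySem.List.pyRange 1 x.2 ++ [x.2] :=
      PySem.List.pyRange_one_succ_right (by omega)
    rw [hsplit, List.flatMap_append, List.flatMap_append]
    -- left part of the new list: x lands at the end of bucket x.2
    have hLlow : (PySem.List.pyRange 1 x.2).flatMap (fun c => (l ++ [x]).filter (fun p => p.2 == c))
        = (PySem.List.pyRange 1 x.2).flatMap (fun c => l.filter (fun p => p.2 == c)) := by
      apply List.flatMap_congr
      intro c hc
      have hcb := PySem.List.mem_pyRange_one.mp hc
      have : (x.2 == c) = false := by simp; omega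
      simp [List.filter_append, this]
    have hLx : ((l ++ [x]).filter (fun p => p.2 == x.2)) = l.filter (fun p => p.2 == x.2) ++ [x] := by
      simp [List.filter_append]
    have hLhigh : (PySem.List.pyRange (x.2 + 1) (M + 1)).flatMap (fun c => (l ++ [x]).filter (fun p => p.2 == c))
        = (PySem.List.pyRange (x.2 + 1) (M + 1)).flatMap (fun c => l.filter (fun p => p.2 == c)) := by
      apply List.flatMap_congr
      intro c hc
      have hcb := PySem.List.mem_pyRange_one.mp hc
      have : (x.2 == c) = false := by simp; omega
      simp [List.filter_append, this]
    -- compute the insertBy on the right-hand side first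

    have hPle : ∀ y ∈ (PySem.List.pyRange 1 (x.2 + 1)).flatMap (fun c => l.filter (fun p => p.2 == c)),
        (decide (x.2 < y.2)) = false := by
      intro y hy
      rcases List.mem_flatMap.mp hy with ⟨c, hc, hyf⟩
      have hcb := PySem.List.mem_pyRange_one.mp hc
      have hy2 : y.2 = c := by
        have := List.of_mem_filter hyf
        simpa using this
      simp; omega
    have hSgt : ∀ y ∈ (PySem.List.pyRange (x.2 + 1) (M + 1)).flatMap (fun c => l.filter (fun p => p.2 == c)),
        x.2 < y.2 := by
      intro y hy
      rcases List.mem_flatMap.mp hy with ⟨c, hc, hyf⟩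
      have hcb := PySem.List.mem_pyRange_one.mp hc
      have hy2 : y.2 = c := by
        have := List.of_mem_filter hyf
        simpa using this
      omega
    rw [pv_insertBy_append_left _ _ _ _ hPle, hLhigh]
    have hins : PySem.List.insertBy (fun a b => decide (a.2 < b.2)) x
        ((PySem.List.pyRange (x.2 + 1) (M + 1)).flatMap (fun c => l.filter (fun p => p.2 == c)))
        = x :: (PySem.List.pyRange (x.2 + 1) (M + 1)).flatMap (fun c => l.filter (fun p => p.2 == c)) := by
      cases hS : (PySem.List.pyRange (x.2 + 1) (M + 1)).flatMap (fun c => l.filter (fun p => p.2 == c)) with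
      | nil => simp [PySem.List.insertBy]
      | cons y ys =>
        have : x.2 < y.2 := hSgt y (by rw [hS]; exact List.mem_cons_self)
        simp [PySem.List.insertBy, this]
    rw [hins, h1, List.flatMap_append, List.flatMap_append]
    simp only [List.flatMap_cons, List.flatMap_nil, List.append_nil]
    rw [hLlow, hLx]
    simp [List.append_assoc]

-- A's counting loop builds Counter(sales)
theorem pv_countA_eq_counter (sales : List String) :
    sales.foldl (fun d book =>
      if d.contains book then d.insert book (d.getD book 0 + 1)
      else d.insert book 1) PySem.Dict.empty = PySem.Dict.counter sales := by
  have hfun : (fun (d : PySem.Dict String Int) book =>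
      if d.contains book then d.insert book (d.getD book 0 + 1)
      else d.insert book 1)
      = (fun (d : PySem.Dict String Int) book => d.insert book (d.getD book 0 + 1)) := by
    funext d b
    by_cases hc : d.contains b
    · simp [hc]
    · rw [if_neg (by simpa using hc), PySem.Dict.getD_of_not_contains d 0 (by simpa using hc)]
      norm_num
  rw [hfun, PySem.Dict.foldl_insert_getD_add_one_eq_counter]

-- dict(pairs) with distinct keys keeps the pair list
theorem pv_ofList_items_of_nodup {ν : Type} (l : List (String × ν))
    (h : (l.map Prod.fst).Nodup) : (PySem.Dict.ofList l).items = l := by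
  have hof : PySem.Dict.ofList l = l.foldl (fun d p => d.insert p.1 p.2) PySem.Dict.empty := by
    simp [PySem.Dict.ofList, PySem.Dict.update]
  rw [hof]
  have := PySem.Dict.items_foldl_insert_fresh l Prod.fst Prod.snd PySem.Dict.empty
    (fun a _ => PySem.Dict.contains_empty _) h
  simpa using this

-- ===== VERDICT (by name: the statement is the Claim_ definition above) =====
theorem nth_lowest_selling_spec : Claim_equal_nth_lowest_selling := by
  intro sales n _
  unfold Spec_nth_lowest_selling nth_lowest_selling nth_lowest_selling_alt
  simp only [PySem.Dict.foldl_insert_getD_add_one_eq_counter]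
  rw [pv_countA_eq_counter sales]
  have hperm : (PySem.List.sorted (PySem.Dict.counter sales).items (fun p => p.2) false).Perm
      (PySem.Dict.counter sales).items := PySem.List.sorted_perm _ _ _
  have hnd : ((PySem.List.sorted (PySem.Dict.counter sales).items (fun p => p.2) false).map Prod.fst).Nodup :=
    ((hperm.map Prod.fst).nodup_iff).mpr (PySem.Dict.nodup_keys_counter sales)
  have hci : (PySem.Dict.ofList (PySem.List.sorted (PySem.Dict.counter sales).items (fun p => p.2) false)).items
      = PySem.List.sorted (PySem.Dict.counter sales).items (fun p => p.2) false :=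
    pv_ofList_items_of_nodup _ hnd
  have hsize : (PySem.Dict.ofList (PySem.List.sorted (PySem.Dict.counter sales).items (fun p => p.2) false)).size
      = (PySem.Dict.counter sales).size := by
    show (PySem.Dict.ofList (PySem.List.sorted (PySem.Dict.counter sales).items (fun p => p.2) false)).items.length
      = (PySem.Dict.counter sales).items.length
    rw [hci, PySem.List.length_sorted]
  rw [hsize]
  by_cases hg : n ≤ 0 ∨ ((PySem.Dict.counter sales).size : Int) < n
  · simp [hg]
  · rw [if_neg hg, if_neg hg]
    have hn : 0 < n ∧ n ≤ ((PySem.Dict.counter sales).size : Int) := by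
      push Not at hg; omega
    have hne : (PySem.Dict.counter sales).items ≠ [] := by
      intro hemp
      have : (PySem.Dict.counter sales).size = 0 := by
        show (PySem.Dict.counter sales).items.length = 0
        rw [hemp]; rfl
      omega
    have hkeys : ((List.map (fun p => (p.2, p.1)) (PySem.Dict.counter sales).items).foldl
        (fun d p => d.modify p.1 [] fun v => v ++ [p.2]) PySem.Dict.empty).keys
        = PySem.Set.ofList ((PySem.Dict.counter sales).items.map (fun p => p.2)) := by
      rw [PySem.Dict.keys_foldl_modify_key _ Prod.fst [] (fun _ x => fun v => v ++ [x.2]) PySem.Dict.empty]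
      rw [PySem.Dict.keys_empty]
      simp only [PySem.Set.update, PySem.Set.ofList, List.map_map]
      rfl
    have hkne : ((List.map (fun p => (p.2, p.1)) (PySem.Dict.counter sales).items).foldl
        (fun d p => d.modify p.1 [] fun v => v ++ [p.2]) PySem.Dict.empty).keys ≠ [] := by
      rw [hkeys]
      obtain ⟨p, hp⟩ := List.exists_mem_of_ne_nil _ hne
      intro hemp
      have := (PySem.Set.mem_ofList ((PySem.Dict.counter sales).items.map (fun p => p.2)) p.2).mpr
        (List.mem_map_of_mem hp)
      rw [hemp] at this
      simp at this
    obtain ⟨m, hm⟩ := pv_max?_isSome_of_ne_nil _ hkne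
    simp only [hm]
    have hb : ∀ p ∈ (PySem.Dict.counter sales).items, 1 ≤ p.2 ∧ p.2 ≤ m := by
      intro p hp
      refine ⟨?_, ?_⟩
      · rw [PySem.Dict.items_counter] at hp
        rcases List.mem_map.mp hp with ⟨k, hk, rfl⟩
        have hks : k ∈ sales := (PySem.Set.mem_ofList sales k).mp hk
        have : 0 < sales.count k := List.count_pos_iff.mpr hks
        show (1 : Int) ≤ (sales.count k : Int)
        exact_mod_cast this
      · have hmem : p.2 ∈ ((List.map (fun p => (p.2, p.1)) (PySem.Dict.counter sales).items).foldl
            (fun d p => d.modify p.1 [] fun v => v ++ [p.2]) PySem.Dict.empty).keys := by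
          rw [hkeys]
          exact (PySem.Set.mem_ofList _ _).mpr (List.mem_map_of_mem hp)
        exact PySem.List.max?_isMax hm p.2 hmem
    have hgetD : ∀ c, ((List.map (fun p => (p.2, p.1)) (PySem.Dict.counter sales).items).foldl
        (fun d p => d.modify p.1 [] fun v => v ++ [p.2]) PySem.Dict.empty).getD c []
        = ((PySem.Dict.counter sales).items.filter (fun p => p.2 == c)).map Prod.fst := by
      intro c
      rw [PySem.Dict.getD_foldl_modify_append]
      rw [PySem.Dict.getD_empty]
      simp only [List.nil_append, List.filter_map, List.map_map]
      rfl
    rw [PySem.List.foldl_append_eq_flatMap]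
    have hflat : (PySem.List.pyRange 1 (m + 1)).flatMap (fun c =>
        ((List.map (fun p => (p.2, p.1)) (PySem.Dict.counter sales).items).foldl
          (fun d p => d.modify p.1 [] fun v => v ++ [p.2]) PySem.Dict.empty).getD c [])
        = ((PySem.List.pyRange 1 (m + 1)).flatMap (fun c =>
            (PySem.Dict.counter sales).items.filter (fun p => p.2 == c))).map Prod.fst := by
      rw [List.map_flatMap]
      exact List.flatMap_congr (fun c _ => hgetD c)
    rw [hflat, pv_bucketize _ m hb]
    have hkeysA : (PySem.Dict.ofList (PySem.List.sorted (PySem.Dict.counter sales).items (fun p => p.2) false)).keys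
        = (PySem.List.sorted (PySem.Dict.counter sales).items (fun p => p.2) false).map Prod.fst := by
      show (PySem.Dict.ofList (PySem.List.sorted (PySem.Dict.counter sales).items (fun p => p.2) false)).items.map Prod.fst = _
      rw [hci]
    rw [hkeysA]
    simp
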